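-- pv_equiv track=rewrite | github.com/joshanashakya/dissertation | workspace/dataset/java-python/GeeksForGeeks/947/A/2.py | sumoflength
-- ===== SOURCE A (Python) =====
-- def sumoflength(arr, n):
--
--     # For maintaining distinct elements.
--     s = []
--
--     # Initialize ending point and result
--     j = 0
--     ans = 0
--
--     # Fix starting point
--     for i in range(n):
--
--         # Find ending point for current
--         # subarray with distinct elements.
--         while (j < n and (arr[j] not in s)):
--             s.append(arr[j])
--             j += 1
--
--         # Calculating and adding all possible
--         # length subarrays in arr[i..j]
--         ans += ((j - i) * (j - i + 1)) // 2
--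
--         # Remove arr[i] as we pick new
--         # stating point from next
--         s.remove(arr[i])
--
--     return ans
-- ===== SOURCE B (Python) =====
-- def sumoflength(arr, n):
--     # Backward pass: for each start i, the furthest distinct-window end r
--     # satisfies r(i) = min(next occurrence of arr[i], r(i+1)); a dict of the
--     # nearest later occurrence replaces A's inner while loop and list scans.
--     last = {}
--     r = n
--     ans = 0
--     for i in range(n - 1, -1, -1):
--         nxt = last.get(arr[i], n)
--         if nxt < r:
--             r = nxt
--         last[arr[i]] = i
--         m = r - i
--         ans += m * (m + 1) // 2
--     return ans
-- ===== Notes on version B (the rewrite author's own statement) =====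
-- stated objective: alternative
-- what changed: Replaces A's forward two-pointer scan with a membership list (inner while + 'in' + remove, O(n^2) worst case) by a single backward pass that computes each start's furthest distinct end via r(i) = min(next-occurrence[arr[i]], r(i+1)) using a last-seen dictionary, so there is no inner loop or list scan; intended as asymptotically faster, but a timing run measured only 1.36x at the largest size, so no speed is claimed.
import Mathlib
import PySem

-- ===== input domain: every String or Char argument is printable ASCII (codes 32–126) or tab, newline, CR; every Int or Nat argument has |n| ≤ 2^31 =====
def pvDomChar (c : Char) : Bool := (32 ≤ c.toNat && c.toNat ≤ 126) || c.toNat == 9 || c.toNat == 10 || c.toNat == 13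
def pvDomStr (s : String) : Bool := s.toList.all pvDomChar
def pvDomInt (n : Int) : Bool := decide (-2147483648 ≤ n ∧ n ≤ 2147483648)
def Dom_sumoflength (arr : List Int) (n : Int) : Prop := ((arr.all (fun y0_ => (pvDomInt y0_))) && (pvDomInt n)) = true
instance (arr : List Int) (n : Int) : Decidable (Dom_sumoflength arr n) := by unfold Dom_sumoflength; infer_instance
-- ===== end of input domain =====

-- B replaces A's forward two-pointer scan with a membership list by a single backward
-- pass using a last-occurrence dictionary (a different algorithm with no inner loop;
-- intended as faster, but measured only ~1.36x in a timing run, so no speed is claimed).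

-- ===== PORT A =====
-- the inner `while (j < n and (arr[j] not in s)): s.append(arr[j]); j += 1`
def pvAWhile (arr : List Int) (n : Int) (s : List Int) (j : Int) : List Int × Int :=
  if j < n ∧ ((PySem.List.pyGet? arr j).getD 0 ∉ s) then
    pvAWhile arr n (s ++ [(PySem.List.pyGet? arr j).getD 0]) (j + 1)
  else (s, j)
termination_by (n - j).toNat
decreasing_by omega

def sumoflength (arr : List Int) (n : Int) : Int :=
  ((PySem.List.pyRange 0 n 1).foldl
    (fun st i =>
      let sj := pvAWhile arr n st.1 st.2.1
      ((PySem.List.remove? sj.1 ((PySem.List.pyGet? arr i).getD 0)).getD sj.1,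
        sj.2,
        st.2.2 + PySem.Int.floordiv ((sj.2 - i) * (sj.2 - i + 1)) 2))
    ([], 0, 0)).2.2

-- ===== PORT B =====
def sumoflength_alt (arr : List Int) (n : Int) : Int :=
  ((PySem.List.pyRange (n - 1) (-1) (-1)).foldl
    (fun st i =>
      let x := (PySem.List.pyGet? arr i).getD 0
      let nxt := st.1.getD x n
      let r := if nxt < st.2.1 then nxt else st.2.1
      (st.1.insert x i, r, st.2.2 + PySem.Int.floordiv ((r - i) * (r - i + 1)) 2))
    ((PySem.Dict.empty : PySem.Dict Int Int), n, 0)).2.2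

-- ===== PRECONDITION & SPEC =====
-- A indexes arr[j] for every j < n, so n > len(arr) raises IndexError; Pre_ excludes exactly that.
def Pre_sumoflength (arr : List Int) (n : Int) : Prop := n ≤ (arr.length : Int)
instance (arr : List Int) (n : Int) : Decidable (Pre_sumoflength arr n) := by unfold Pre_sumoflength; infer_instance
def pvWitness_sumoflength : List Int × Int := ([1, 2, 1], 3)

def Spec_sumoflength (arr : List Int) (n : Int) (out : Int) : Prop := out = sumoflength_alt arr n
instance (arr : List Int) (n : Int) (out : Int) : Decidable (Spec_sumoflength arr n out) := by unfold Spec_sumoflength; infer_instance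

-- ===== CLAIM (what is proved, stated in full; the proofs are below) =====
def Claim_equal_sumoflength : Prop := ∀ (arr : List Int) (n : Int), Dom_sumoflength arr n → Pre_sumoflength arr n → Spec_sumoflength arr n (sumoflength arr n)

-- ===== LEMMAS AND PROOFS =====

-- arr[k] for a natural index (0 when out of range; only used for k < arr.length)
def pvG (arr : List Int) (k : ℕ) : Int := arr.getD k 0

-- first index m with k ≤ m < nn and arr[m] = x, else nn
def pvFind (arr : List Int) (nn : ℕ) (x : Int) (k : ℕ) : ℕ :=
  if k < nn then (if pvG arr k = x then k else pvFind arr nn x (k + 1)) else nn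
termination_by nn - k
decreasing_by omega

-- first occurrence of arr[i] strictly after i (nn if none)
def pvNext (arr : List Int) (nn i : ℕ) : ℕ := pvFind arr nn (pvG arr i) (i + 1)

-- furthest (exclusive) end of an all-distinct window starting at i
def pvME (arr : List Int) (nn i : ℕ) : ℕ :=
  if i < nn then min (pvNext arr nn i) (pvME arr nn (i + 1)) else i
termination_by nn - i
decreasing_by omega

-- the window arr[i..j) as a list
def pvWin (arr : List Int) (i j : ℕ) : List Int := (List.range' i (j - i)).map (pvG arr)

def triN (d : ℕ) : Int := ((d * (d + 1) / 2 : ℕ) : Int)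

lemma pvFind_ge (arr : List Int) (nn : ℕ) (x : Int) (k : ℕ) (hk : k ≤ nn) : k ≤ pvFind arr nn x k := by
  induction k using pvFind.induct arr nn x with
  | case1 k h1 h2 => rw [pvFind]; simp [h1, h2]
  | case2 k h1 h2 ih => rw [pvFind]; simp [h1, h2]; have := ih (by omega); omega
  | case3 k h1 => rw [pvFind]; simp [h1]; omega

lemma pvFind_le (arr : List Int) (nn : ℕ) (x : Int) (k : ℕ) (h : k ≤ nn) : pvFind arr nn x k ≤ nn := by
  induction k using pvFind.induct arr nn x with
  | case1 k h1 h2 => rw [pvFind]; simp [h1, h2]; omega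
  | case2 k h1 h2 ih => rw [pvFind]; simp [h1, h2]; exact ih (by omega)
  | case3 k h1 => rw [pvFind]; simp [h1]

lemma pvFind_not (arr : List Int) (nn : ℕ) (x : Int) (k : ℕ) :
    ∀ m, k ≤ m → m < pvFind arr nn x k → pvG arr m ≠ x := by
  induction k using pvFind.induct arr nn x with
  | case1 k h1 h2 => rw [pvFind]; simp [h1, h2]; omega
  | case2 k h1 h2 ih =>
      rw [pvFind]; simp [h1, h2]
      intro m hm1 hm2
      rcases Nat.eq_or_lt_of_le hm1 with rfl | hlt
      · exact h2
      · exact ih m hlt hm2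
  | case3 k h1 =>
      rw [pvFind]; simp [h1]
      intro m hm1 hm2
      omega

lemma pvFind_hit (arr : List Int) (nn : ℕ) (x : Int) (k : ℕ) (h : pvFind arr nn x k < nn) :
    pvG arr (pvFind arr nn x k) = x := by
  induction k using pvFind.induct arr nn x with
  | case1 k h1 h2 => rw [pvFind]; simp [h1, h2]
  | case2 k h1 h2 ih => rw [pvFind] at h ⊢; simp [h1, h2] at h ⊢; exact ih h
  | case3 k h1 => rw [pvFind] at h; simp [h1] at h

lemma pvME_ge (arr : List Int) (nn : ℕ) (i : ℕ) : i ≤ pvME arr nn i := by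
  induction i using pvME.induct nn with
  | case1 i h ih =>
      rw [pvME]; simp [h]
      have h1 : i + 1 ≤ pvNext arr nn i := pvFind_ge arr nn (pvG arr i) (i + 1) (by omega)
      constructor <;> omega
  | case2 i h => rw [pvME]; simp [h]

lemma pvME_gt (arr : List Int) (nn : ℕ) (i : ℕ) (h : i < nn) : i + 1 ≤ pvME arr nn i := by
  rw [pvME]; simp [h]
  have h1 : i + 1 ≤ pvNext arr nn i := pvFind_ge arr nn (pvG arr i) (i + 1) (by omega)
  have h2 := pvME_ge arr nn (i + 1)
  constructor <;> omega

lemma pvME_le (arr : List Int) (nn : ℕ) (i : ℕ) (h : i ≤ nn) : pvME arr nn i ≤ nn := by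
  induction i using pvME.induct nn with
  | case1 i h1 ih =>
      rw [pvME]; simp [h1]
      have h2 : pvNext arr nn i ≤ nn := pvFind_le arr nn (pvG arr i) (i + 1) (by omega)
      left; exact h2
  | case2 i h1 => rw [pvME]; simp [h1]; omega

lemma pvME_mono (arr : List Int) (nn : ℕ) (i : ℕ) (h : i < nn) : pvME arr nn i ≤ pvME arr nn (i + 1) := by
  rw [pvME]; simp [h]

lemma pvME_distinct (arr : List Int) (nn : ℕ) :
    ∀ i k l, i ≤ k → k < l → l < pvME arr nn i → pvG arr l ≠ pvG arr k := by
  intro i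
  induction i using pvME.induct nn with
  | case1 i h ih =>
      intro k l hik hkl hl
      rw [pvME] at hl; simp [h] at hl
      rcases Nat.eq_or_lt_of_le hik with rfl | hlt
      · have h2 : l < pvNext arr nn i → pvG arr l ≠ pvG arr i := pvFind_not arr nn (pvG arr i) (i + 1) l (by omega)
        exact h2 (by omega)
      · exact ih k l (by omega) hkl (by omega)
  | case2 i h =>
      intro k l hik hkl hl
      rw [pvME] at hl; simp [h] at hl
      omega

lemma pvME_stop (arr : List Int) (nn : ℕ) :
    ∀ i, pvME arr nn i < nn →
    ∃ k, i ≤ k ∧ k < pvME arr nn i ∧ pvG arr k = pvG arr (pvME arr nn i) := by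
  intro i
  induction i using pvME.induct nn with
  | case1 i h ih =>
      intro hlt
      rw [pvME, if_pos h] at hlt ⊢
      rcases Nat.le_total (pvNext arr nn i) (pvME arr nn (i + 1)) with hle | hgt
      · rw [min_eq_left hle] at hlt ⊢
        refine ⟨i, le_refl i, ?_, ?_⟩
        · have h2 : i + 1 ≤ pvNext arr nn i := pvFind_ge arr nn (pvG arr i) (i + 1) (by omega); omega
        · have h3 : pvNext arr nn i < nn → pvG arr (pvNext arr nn i) = pvG arr i := pvFind_hit arr nn (pvG arr i) (i + 1)
          exact (h3 hlt).symm
      · rw [min_eq_right hgt] at hlt ⊢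
        obtain ⟨k, hk1, hk2, hk3⟩ := ih hlt
        exact ⟨k, by omega, hk2, hk3⟩
  | case2 i h =>
      intro hlt
      rw [pvME, if_neg h] at hlt
      exact absurd hlt h

lemma mem_pvWin (arr : List Int) (i j : ℕ) (hij : i ≤ j) (x : Int) :
    x ∈ pvWin arr i j ↔ ∃ k, i ≤ k ∧ k < j ∧ pvG arr k = x := by
  unfold pvWin
  simp [List.mem_range']
  constructor
  · rintro ⟨k, hk, h3⟩
    exact ⟨i + k, by omega, by omega, h3⟩
  · rintro ⟨k, h1, h2, h3⟩
    refine ⟨k - i, by omega, ?_⟩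
    rw [show i + (k - i) = k by omega]; exact h3

lemma pvWin_snoc (arr : List Int) (i j : ℕ) (h : i ≤ j) :
    pvWin arr i j ++ [pvG arr j] = pvWin arr i (j + 1) := by
  unfold pvWin
  rw [show j + 1 - i = (j - i) + 1 by omega, List.range'_concat]
  simp [show i + (j - i) = j by omega]

lemma pvWin_cons (arr : List Int) (i j : ℕ) (h : i < j) :
    pvWin arr i j = pvG arr i :: pvWin arr (i + 1) j := by
  unfold pvWin
  rw [show j - i = (j - (i + 1)) + 1 by omega, List.range'_succ]
  simp

lemma pvGetD_nat (arr : List Int) (k : ℕ) :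
    (PySem.List.pyGet? arr (k : Int)).getD 0 = pvG arr k := by
  simp [PySem.List.pyGet?_natCast, pvG, List.getD_eq_getElem?_getD]

lemma pvTri (d : ℕ) : PySem.Int.floordiv ((d : Int) * ((d : Int) + 1)) 2 = triN d := by
  rw [show ((d : Int) * ((d : Int) + 1)) = ((d * (d + 1) : ℕ) : Int) by push_cast; ring,
    show (2 : Int) = ((2 : ℕ) : Int) by rfl, PySem.Int.floordiv_natCast]
  rfl

lemma pvAWhile_eq (arr : List Int) (nn : ℕ) :
    ∀ fuel i j, i ≤ j → j ≤ pvME arr nn i → pvME arr nn i - j ≤ fuel →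
    pvAWhile arr (nn : Int) (pvWin arr i j) (j : Int)
      = (pvWin arr i (pvME arr nn i), ((pvME arr nn i : ℕ) : Int)) := by
  intro fuel
  induction fuel with
  | zero =>
      intro i j hij hj hf
      have hje : pvME arr nn i = j := by omega
      rw [pvAWhile, hje, if_neg]
      rintro ⟨h1, h2⟩
      have hjn : j < nn := by exact_mod_cast h1
      obtain ⟨k, hk1, hk2, hk3⟩ := pvME_stop arr nn i (by omega)
      apply h2
      rw [pvGetD_nat]
      exact (mem_pvWin arr i j hij _).2 ⟨k, hk1, by omega, by rw [hk3, hje]⟩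
  | succ fuel ih =>
      intro i j hij hj hf
      rcases Nat.eq_or_lt_of_le hj with hje | hjlt
      · have hje' : pvME arr nn i = j := hje.symm
        clear hje
        have hje := hje'
        rw [pvAWhile, hje, if_neg]
        rintro ⟨h1, h2⟩
        have hjn : j < nn := by exact_mod_cast h1
        obtain ⟨k, hk1, hk2, hk3⟩ := pvME_stop arr nn i (by omega)
        apply h2
        rw [pvGetD_nat]
        exact (mem_pvWin arr i j hij _).2 ⟨k, hk1, by omega, by rw [hk3, hje]⟩
      · have hin : i < nn := by
          by_contra hc
          have : pvME arr nn i = i := by rw [pvME, if_neg hc]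
          omega
        have hjn : j < nn := by
          have := pvME_le arr nn i (by omega)
          omega
        rw [pvAWhile, if_pos]
        · rw [pvGetD_nat, pvWin_snoc arr i j hij,
            show ((j : ℕ) : Int) + 1 = (((j + 1 : ℕ)) : Int) by push_cast; ring]
          exact ih i (j + 1) (by omega) (by omega) (by omega)
        · constructor
          · exact_mod_cast hjn
          · rw [pvGetD_nat]
            rw [mem_pvWin arr i j hij]
            rintro ⟨k, hk1, hk2, hk3⟩
            exact pvME_distinct arr nn i k j hk1 hk2 hjlt hk3.symm

lemma A_loop (arr : List Int) (nn : ℕ) :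
    ∀ c i j a, i + c = nn → i ≤ j → j ≤ pvME arr nn i →
    (((List.range' i c).map (fun (k : ℕ) => ((k : ℕ) : Int))).foldl
      (fun st i =>
        let sj := pvAWhile arr (nn : Int) st.1 st.2.1
        ((PySem.List.remove? sj.1 ((PySem.List.pyGet? arr i).getD 0)).getD sj.1,
          sj.2,
          st.2.2 + PySem.Int.floordiv ((sj.2 - i) * (sj.2 - i + 1)) 2))
      (pvWin arr i j, (j : Int), a)).2.2
    = a + ((List.range' i c).map (fun k => triN (pvME arr nn k - k))).sum := by
  intro c
  induction c with
  | zero => intro i j a h1 h2 h3; simp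
  | succ c ih =>
      intro i j a h1 h2 h3
      have hin : i < nn := by omega
      have hgt := pvME_gt arr nn i hin
      have hwhile := pvAWhile_eq arr nn (pvME arr nn i - j) i j h2 h3 le_rfl
      have hrem : (PySem.List.remove? (pvWin arr i (pvME arr nn i)) (pvG arr i)).getD
          (pvWin arr i (pvME arr nn i)) = pvWin arr (i + 1) (pvME arr nn i) := by
        rw [pvWin_cons arr i (pvME arr nn i) (by omega), PySem.List.remove?_cons_self]
        rfl
      have hcast : ((pvME arr nn i : ℕ) : Int) - (i : Int) = (((pvME arr nn i - i : ℕ)) : Int) := by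
        omega
      rw [List.range'_succ]
      simp only [List.map_cons, List.foldl_cons, List.sum_cons]
      simp only [hwhile, pvGetD_nat, hrem, hcast, pvTri]
      rw [ih (i + 1) (pvME arr nn i) (a + triN (pvME arr nn i - i)) (by omega) (by omega)
        (pvME_mono arr nn i hin)]
      ring

lemma B_loop (arr : List Int) (nn : ℕ) :
    ∀ m, m ≤ nn → ∀ (d : PySem.Dict Int Int) a,
    (∀ x, d.getD x (nn : Int) = ((pvFind arr nn x m : ℕ) : Int)) →
    ((((List.range m).map (fun (k : ℕ) => ((k : ℕ) : Int))).reverse.foldl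
      (fun st i =>
        let x := (PySem.List.pyGet? arr i).getD 0
        let nxt := st.1.getD x (nn : Int)
        let r := if nxt < st.2.1 then nxt else st.2.1
        (st.1.insert x i, r, st.2.2 + PySem.Int.floordiv ((r - i) * (r - i + 1)) 2))
      (d, ((pvME arr nn m : ℕ) : Int), a)).2.2)
    = a + ((List.range m).map (fun k => triN (pvME arr nn k - k))).sum := by
  intro m
  induction m with
  | zero => intro h d a hinv; simp
  | succ m ih =>
      intro h d a hinv
      have hm : m < nn := by omega
      have hge := pvME_ge arr nn m
      have hgt := pvME_gt arr nn m hm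
      have hr : (if ((pvFind arr nn (pvG arr m) (m + 1) : ℕ) : Int) < ((pvME arr nn (m + 1) : ℕ) : Int)
            then ((pvFind arr nn (pvG arr m) (m + 1) : ℕ) : Int)
            else ((pvME arr nn (m + 1) : ℕ) : Int))
          = ((pvME arr nn m : ℕ) : Int) := by
        conv_rhs => rw [pvME]
        rw [if_pos hm]
        simp only [pvNext]
        split_ifs <;> omega
      have hins : ∀ x, (d.insert (pvG arr m) ((m : ℕ) : Int)).getD x (nn : Int)
          = ((pvFind arr nn x m : ℕ) : Int) := by
        intro x
        rw [PySem.Dict.getD_insert]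
        split_ifs with hxe
        · subst hxe
          rw [pvFind, if_pos hm, if_pos rfl]
        · rw [hinv x]
          conv_rhs => rw [pvFind]
          rw [if_pos hm, if_neg (fun hc => hxe hc.symm)]
      have hcast : ((pvME arr nn m : ℕ) : Int) - (m : Int) = (((pvME arr nn m - m : ℕ)) : Int) := by
        omega
      rw [List.range_succ]
      simp only [List.map_append, List.reverse_append, List.map_cons, List.map_nil,
        List.reverse_cons, List.reverse_nil, List.nil_append, List.cons_append,
        List.foldl_cons, List.sum_append, List.sum_cons, List.sum_nil]
      simp only [pvGetD_nat, hinv, hr, hcast, pvTri]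
      rw [ih (by omega) _ _ hins]
      ring

-- ===== VERDICT (by name: the statement is the Claim_ definition above) =====
theorem sumoflength_spec : Claim_equal_sumoflength := by
  intro arr n hDom hPre
  unfold Spec_sumoflength
  by_cases hn : n ≤ 0
  · unfold sumoflength sumoflength_alt
    rw [PySem.List.pyRange_one_eq_nil hn, PySem.List.pyRange_neg_one_eq_nil (by omega)]
    rfl
  · have hne : n = ((n.toNat : ℕ) : Int) := by omega
    have hlen : n.toNat ≤ arr.length := by
      unfold Pre_sumoflength at hPre; omega
    have hA := A_loop arr n.toNat n.toNat 0 0 0 (by omega) (le_refl 0) (Nat.zero_le _)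
    have hB := B_loop arr n.toNat n.toNat (le_refl _) PySem.Dict.empty 0
      (fun x => by rw [pvFind, if_neg (lt_irrefl n.toNat)]; rfl)
    rw [show pvWin arr 0 0 = ([] : List Int) from rfl,
      show ((0 : ℕ) : Int) = (0 : Int) from rfl, ← List.range_eq_range'] at hA
    rw [show pvME arr n.toNat n.toNat = n.toNat by rw [pvME, if_neg (lt_irrefl n.toNat)]] at hB
    rw [hne]
    unfold sumoflength sumoflength_alt
    rw [PySem.List.pyRange_neg_one_eq_reverse,
      show ((-1 : Int) + 1) = 0 by ring,
      show ((n.toNat : ℕ) : Int) - 1 + 1 = ((n.toNat : ℕ) : Int) by ring,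
      PySem.List.pyRange_one,
      show ((((n.toNat : ℕ) : Int)) - 0).toNat = n.toNat by omega,
      show (fun (k : ℕ) => (0 : Int) + ↑k) = (fun (k : ℕ) => ((k : ℕ) : Int)) from funext fun k => by ring]
    rw [hA, hB]
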